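-- pv_equiv track=rewrite | github.com/Jhuni0123/flareon-bot | chib.py | Mkd
-- ===== SOURCE A (Python) =====
-- def Mkd(n):
--     sum = 0
--     k=1
--     while n>0:
--         if n%10 ==1:
--            sum = sum+k
--         n = n//10
--         k=k*2
--     return sum
-- ===== SOURCE B (Python) =====
-- def Mkd(n):
--     # Horner evaluation of the decimal string as binary: digit '1' -> bit 1, others -> bit 0.
--     acc = 0
--     if n > 0:
--         for c in str(n):
--             acc = 2 * acc + (c == '1')
--     return acc
-- ===== Notes on version B (the rewrite author's own statement) =====
-- stated objective: alternative
-- what changed: A peels decimal digits arithmetically LSB-first while maintaining an explicit power-of-two weight k; B converts n to its decimal string once and folds over it MSB-first with a Horner step (acc = 2*acc + (c=='1')), so no power accumulator or repeated //10,%10 arithmetic is kept.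
import Mathlib
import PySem

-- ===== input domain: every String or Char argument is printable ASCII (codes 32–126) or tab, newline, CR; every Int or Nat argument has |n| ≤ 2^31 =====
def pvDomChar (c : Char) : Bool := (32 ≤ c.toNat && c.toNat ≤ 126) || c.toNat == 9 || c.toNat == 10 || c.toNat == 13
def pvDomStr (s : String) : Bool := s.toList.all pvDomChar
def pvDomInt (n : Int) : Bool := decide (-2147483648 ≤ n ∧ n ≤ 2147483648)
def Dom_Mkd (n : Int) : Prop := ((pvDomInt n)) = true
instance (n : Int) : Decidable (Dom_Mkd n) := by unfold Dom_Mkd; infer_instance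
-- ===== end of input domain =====

-- B replaces A's LSB-first %10,//10 loop with explicit power weight k by a single
-- MSB-first Horner fold over str(n) ('1' digits contribute a set bit); alternative, not faster.

-- ===== PORT A =====
-- while n>0: if n%10==1: sum += k; n //= 10; k *= 2
def MkdLoop (n k sum : Int) : Int :=
  if 0 < n then
    MkdLoop (PySem.Int.floordiv n 10) (k * 2) (if PySem.Int.mod n 10 = 1 then sum + k else sum)
  else sum
termination_by n.toNat
decreasing_by
  rw [PySem.Int.floordiv_eq_ediv_of_pos (by norm_num)]
  omega

def Mkd (n : Int) : Int := MkdLoop n 1 0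

-- ===== PORT B =====
-- acc = 0; if n > 0: for c in str(n): acc = 2*acc + (c == '1'); return acc
def Mkd_alt (n : Int) : Int :=
  if 0 < n then
    (PySem.Int.toChars n).foldl (fun acc c => 2 * acc + (if c = '1' then 1 else 0)) 0
  else 0

-- ===== PRECONDITION & SPEC =====
def Spec_Mkd (n : Int) (out : Int) : Prop := out = Mkd_alt n
instance (n : Int) (out : Int) : Decidable (Spec_Mkd n out) := by unfold Spec_Mkd; infer_instance

-- ===== CLAIM (what is proved, stated in full; the proofs are below) =====
def Claim_equal_Mkd : Prop := ∀ (n : Int), Dom_Mkd n → Spec_Mkd n (Mkd n)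

-- ===== LEMMAS AND PROOFS =====

-- The common value: binary number whose bit i is 1 iff the i-th decimal digit (LSB-first) is 1.
def pvV (m : Nat) : Int :=
  if m = 0 then 0 else (if m % 10 = 1 then 1 else 0) + 2 * pvV (m / 10)
termination_by m
decreasing_by omega

-- Decimal digit characters of m, MSB first (= Nat.toDigits 10 m, fuel-free form).
def pvD (m : Nat) : List Char :=
  if m / 10 = 0 then [Nat.digitChar (m % 10)]
  else pvD (m / 10) ++ [Nat.digitChar (m % 10)]
termination_by m
decreasing_by omega

theorem pvCore_eq : ∀ (fuel m : Nat) (acc : List Char), m < fuel →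
    Nat.toDigitsCore 10 fuel m acc = pvD m ++ acc := by
  intro fuel
  induction fuel with
  | zero => omega
  | succ f ih =>
    intro m acc h
    rw [Nat.toDigitsCore]
    by_cases h0 : m / 10 = 0
    · simp [h0, pvD]
    · have hm : 0 < m := by omega
      simp only [h0, if_false]
      rw [ih (m / 10) _ (by omega)]
      conv_rhs => rw [pvD, if_neg h0]
      simp

theorem pvToDigits_eq (m : Nat) : Nat.toDigits 10 m = pvD m := by
  rw [Nat.toDigits, pvCore_eq (m + 1) m [] (by omega), List.append_nil]

theorem pvBit_eq (m : Nat) :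
    (if Nat.digitChar (m % 10) = '1' then (1 : Int) else 0)
      = (if m % 10 = 1 then (1 : Int) else 0) := by
  have h : m % 10 < 10 := Nat.mod_lt _ (by omega)
  set r := m % 10 with hr
  interval_cases r <;> decide

theorem pvFoldl_eq (m : Nat) : ∀ (acc : Int),
    (pvD m).foldl (fun acc c => 2 * acc + (if c = '1' then 1 else 0)) acc
      = acc * 2 ^ (pvD m).length + pvV m := by
  induction m using Nat.strong_induction_on with
  | _ m ih =>
    intro acc
    by_cases h0 : m / 10 = 0
    · rw [pvD, if_pos h0]
      simp only [List.foldl_cons, List.foldl_nil, List.length_cons, List.length_nil]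
      rw [pvBit_eq]
      by_cases hm : m = 0
      · subst hm; simp [pvV]; ring
      · rw [pvV, if_neg hm, h0, pvV]
        simp
        ring
    · have hm : 0 < m := by omega
      rw [pvD, if_neg h0]
      rw [List.foldl_append]
      rw [ih (m / 10) (by omega) acc]
      simp only [List.foldl_cons, List.foldl_nil, List.length_append, List.length_cons,
        List.length_nil]
      rw [pvBit_eq,
        show pvV m = (if m % 10 = 1 then (1 : Int) else 0) + 2 * pvV (m / 10) from by
          rw [pvV, if_neg (by omega : ¬ m = 0)]]
      ring

theorem pvLoop_eq_aux : ∀ (m : Nat) (n k sum : Int), n.toNat = m →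
    MkdLoop n k sum = sum + k * pvV n.toNat := by
  intro m
  induction m using Nat.strong_induction_on with
  | _ m ih =>
    intro n k sum hm
    rw [MkdLoop]
    by_cases h : 0 < n
    · rw [if_pos h]
      rw [PySem.Int.floordiv_eq_ediv_of_pos (by norm_num),
        PySem.Int.mod_eq_emod_of_pos (by norm_num)]
      rw [ih (n / 10).toNat (by omega) (n / 10) _ _ rfl]
      have h1 : (n / 10).toNat = n.toNat / 10 := by omega
      have h2 : (n % 10 = 1) ↔ (n.toNat % 10 = 1) := by omega
      rw [h1,
        show pvV n.toNat = (if n.toNat % 10 = 1 then (1 : Int) else 0) + 2 * pvV (n.toNat / 10)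
          from by rw [pvV, if_neg (by omega : ¬ n.toNat = 0)]]
      by_cases hd : n.toNat % 10 = 1
      · rw [if_pos (h2.mpr hd), if_pos hd]; ring
      · rw [if_neg (fun hh => hd (h2.mp hh)), if_neg hd]; ring
    · rw [if_neg h]
      have : n.toNat = 0 := by omega
      rw [this, pvV]
      simp

theorem pvLoop_eq (n k sum : Int) : MkdLoop n k sum = sum + k * pvV n.toNat :=
  pvLoop_eq_aux n.toNat n k sum rfl

-- ===== VERDICT (by name: the statement is the Claim_ definition above) =====
theorem Mkd_spec : Claim_equal_Mkd := by
  intro n hdom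
  unfold Spec_Mkd Mkd Mkd_alt
  rw [pvLoop_eq]
  by_cases h : 0 < n
  · rw [if_pos h]
    have hneg : ¬ n < 0 := by omega
    simp only [PySem.Int.toChars, if_neg hneg]
    rw [pvToDigits_eq, pvFoldl_eq]
    simp
  · rw [if_neg h]
    have : n.toNat = 0 := by omega
    rw [this, pvV]
    simp
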